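-- pv_equiv track=rewrite | github.com/choman56/MIT6.001 | ps4a.py | permeate
-- ===== SOURCE A (Python) =====
-- def permeate(string, character):
--     '''
--     Generates N+1 unique permutation strings fashioned from "string" with the
--     character added to each string in a unique position.
--
--     An example:
--
--         string:    'ab'
--         N:         len('ab') which is 2
--         character: 'c'
--
--         Generates:  'cab', 'acb', 'abc'
--
--
--     Args:
--         string (str): string of characters to pivot character into generating
--                       unique strings
--         character (str): 1 character string that is pivoted into each unique
--                        string
--
--     Returns:
--         list of N+1 strings
--
--     '''
--
--     charLen = len(character)
--     N = len(string) + 1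
--     stringList = []
--
--     if charLen > 1:
--         return stringList
--
--     firstString = character + string
--     lastString = string + character
--     stringList.append(firstString)  # add first string permutation to list
--     stringList.append(lastString)   # add last string permutation to list
--
--     #  add remainder (if any) string permutions to list
--     middleStringsCount = N - 2     # the - 2 accounts for first and last strings already defined
--
--     if middleStringsCount > 0:
--         i = 1
--         for j in range(middleStringsCount):
--             tempstr = string[0:i] + character + string[i:]
--             stringList.append(tempstr)
--             i += 1
--
--     return stringList
-- ===== SOURCE B (Python) =====
-- def permeate(string, character):
--     if len(character) > 1:
--         return []
--     return [character + string, string + character] + _middles("", string, character)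
--
--
-- def _middles(pre, suf, c):
--     # recursively shift one char from suf to pre, emitting pre+c+suf at each split
--     if len(suf) <= 1:
--         return []
--     pre2, suf2 = pre + suf[0], suf[1:]
--     return [pre2 + c + suf2] + _middles(pre2, suf2, c)
-- ===== Notes on version B (the rewrite author's own statement) =====
-- stated objective: alternative
-- what changed: Replaces A's counter-driven loop that re-slices the original string at each index by a recursive helper carrying two rolling accumulators (prefix, suffix) that shift one character per step and emit prefix+character+suffix, with the two end insertions prepended; no index arithmetic or slicing at an index remains.
import Mathlib
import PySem

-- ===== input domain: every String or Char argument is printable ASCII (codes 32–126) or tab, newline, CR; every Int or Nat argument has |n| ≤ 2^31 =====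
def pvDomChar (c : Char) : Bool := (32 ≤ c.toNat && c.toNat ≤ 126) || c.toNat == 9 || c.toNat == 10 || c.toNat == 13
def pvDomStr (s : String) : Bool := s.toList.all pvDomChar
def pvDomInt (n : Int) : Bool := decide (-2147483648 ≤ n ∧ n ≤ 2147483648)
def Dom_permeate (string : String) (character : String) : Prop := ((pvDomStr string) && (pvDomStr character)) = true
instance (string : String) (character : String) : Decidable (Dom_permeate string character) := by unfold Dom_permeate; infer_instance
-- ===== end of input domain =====

-- B replaces A's counter loop with index slicing by a recursive helper over two rolling
-- prefix/suffix accumulators that shift one character per step; objective: alternative.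

-- ===== PORT A =====
-- strings are handled as char lists; the result is assembled with String.ofList at the end
def permeate (string : String) (character : String) : List String :=
  let cs := character.toList
  let s := string.toList
  let charLen : Int := (cs.length : Int)
  let N : Int := (s.length : Int) + 1
  let stringList : List (List Char) := []
  if charLen > 1 then stringList.map String.ofList
  else
    let firstString := cs ++ s
    let lastString := s ++ cs
    let stringList := (stringList ++ [firstString]) ++ [lastString]
    let middleStringsCount := N - 2
    let stringList :=
      if middleStringsCount > 0 then
        ((PySem.List.pyRange 0 middleStringsCount 1).foldl
          (fun (st : List (List Char) × Int) _j =>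
            (st.1 ++ [PySem.List.slice s (some 0) (some st.2) ++ cs ++ PySem.List.slice s (some st.2) none],
             st.2 + 1))
          (stringList, 1)).1
      else stringList
    stringList.map String.ofList

-- ===== PORT B =====
-- B's recursive helper: shift one char from suf to pre, emit pre+c+suf at each split
def pvMiddles (pre suf cs : List Char) : List (List Char) :=
  match suf with
  | [] => []
  | [_] => []
  | x :: y :: t =>
      let pre2 := pre ++ [x]
      let suf2 := y :: t
      (pre2 ++ cs ++ suf2) :: pvMiddles pre2 suf2 cs

def permeate_alt (string : String) (character : String) : List String :=
  if ((character.toList.length : Int)) > 1 then []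
  else
    ([character.toList ++ string.toList, string.toList ++ character.toList]
      ++ pvMiddles [] string.toList character.toList).map String.ofList

-- ===== PRECONDITION & SPEC =====
def Spec_permeate (string : String) (character : String) (out : List String) : Prop := out = permeate_alt string character
instance (string : String) (character : String) (out : List String) : Decidable (Spec_permeate string character out) := by unfold Spec_permeate; infer_instance

-- ===== CLAIM (what is proved, stated in full; the proofs are below) =====
def Claim_equal_permeate : Prop := ∀ (string : String) (character : String), Dom_permeate string character → Spec_permeate string character (permeate string character)

-- ===== LEMMAS AND PROOFS =====

-- A's middle loop (state = list so far × running index i) appends g i for i = start, start+1, …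
theorem pv_loop_eq (g : Int → List Char) (l : List Int) (acc : List (List Char)) (i : Int) :
    (l.foldl (fun (st : List (List Char) × Int) _j => (st.1 ++ [g st.2], st.2 + 1)) (acc, i)).1
      = acc ++ (PySem.List.pyRange i (i + l.length) 1).map g := by
  induction l generalizing acc i with
  | nil => simp [PySem.List.pyRange_one_eq_nil (le_refl i)]
  | cons x t ih =>
      simp only [List.foldl_cons, ih]
      conv_rhs =>
        rw [show (i + ((x :: t).length : Int)) = (i + 1) + (t.length : Int) from by
              simp only [List.length_cons]; push_cast; ring,
            PySem.List.pyRange_one_cons (show i < (i + 1) + (t.length : Int) from by omega)]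
      simp

-- B's rolling-accumulator recursion computes exactly A's slice-at-index family over pre ++ suf
theorem pv_middles_eq (cs : List Char) (suf pre : List Char) :
    pvMiddles pre suf cs
      = (PySem.List.pyRange ((pre.length : Int) + 1) ((pre.length : Int) + (suf.length : Int)) 1).map
          (fun i => PySem.List.slice (pre ++ suf) (some 0) (some i)
                    ++ cs ++ PySem.List.slice (pre ++ suf) (some i) none) := by
  induction suf generalizing pre with
  | nil =>
      have h : PySem.List.pyRange ((pre.length : Int) + 1) ((pre.length : Int) + (([] : List Char).length : Int)) 1 = [] :=
        PySem.List.pyRange_one_eq_nil (by simp)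
      simp only [pvMiddles, h, List.map_nil]
  | cons x t ih =>
      cases t with
      | nil =>
          have h : PySem.List.pyRange ((pre.length : Int) + 1) ((pre.length : Int) + (([x] : List Char).length : Int)) 1 = [] :=
            PySem.List.pyRange_one_eq_nil (by simp)
          simp only [pvMiddles, h, List.map_nil]
      | cons y t' =>
          have hlt : (pre.length : Int) + 1 < (pre.length : Int) + ((x :: y :: t').length : Int) := by
            simp only [List.length_cons]; push_cast; omega
          rw [pvMiddles, PySem.List.pyRange_one_cons (by omega)]
          simp only [List.map_cons]
          congr 1
          · have h1 : ((pre.length : Int) + 1) = (((pre ++ [x]).length : Nat) : Int) := by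
              simp
            rw [h1]
            simp only [PySem.List.slice_zero_start, PySem.List.slice_to_natCast,
              PySem.List.slice_from_natCast]
            have htake : List.take (pre.length + 1) (pre ++ x :: y :: t') = pre ++ [x] := by
              rw [show pre.length + 1 = (pre ++ [x]).length from by simp,
                  show pre ++ x :: y :: t' = (pre ++ [x]) ++ (y :: t') from by simp,
                  List.take_left]
            have hdrop : List.drop (pre.length + 1) (pre ++ x :: y :: t') = y :: t' := by
              rw [show pre.length + 1 = (pre ++ [x]).length from by simp,
                  show pre ++ x :: y :: t' = (pre ++ [x]) ++ (y :: t') from by simp,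
                  List.drop_left]
            simp [htake, hdrop]
          · have h2 := ih (pre ++ [x])
            rw [show pre ++ x :: y :: t' = (pre ++ [x]) ++ (y :: t') from by simp]
            rw [h2]
            congr 2 <;> · simp only [List.length_append, List.length_cons, List.length_nil]
                          push_cast; ring

-- ===== VERDICT (by name: the statement is the Claim_ definition above) =====
theorem permeate_spec : Claim_equal_permeate := by
  unfold Claim_equal_permeate
  intro string character _
  unfold Spec_permeate permeate permeate_alt
  set cs := character.toList with hcs
  set s := string.toList with hs
  by_cases hlen : ((cs.length : Int)) > 1
  · simp [hlen]
  · simp only [hlen, if_false]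
    by_cases hmid : ((s.length : Int)) + 1 - 2 > 0
    · simp only [hmid, if_pos]
      rw [pv_loop_eq (fun i => PySem.List.slice s (some 0) (some i) ++ cs ++ PySem.List.slice s (some i) none)]
      have hLen : (1 : Int) + ((PySem.List.pyRange 0 ((s.length : Int) + 1 - 2) 1).length : Int)
          = ((s.length : Int)) := by
        rw [PySem.List.length_pyRange_one]; omega
      rw [hLen, pv_middles_eq cs s []]
      simp
    · simp only [hmid, if_false]
      have hmids : pvMiddles [] s cs = [] := by
        match s, hmid with
        | [], _ => rfl
        | [_], _ => rfl
        | (a :: b :: u), h => exact absurd (by simp only [List.length_cons]; push_cast; omega) h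
      rw [hmids]
      simp
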